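-- pv_equiv track=rewrite | github.com/daajoe/benchmark-tool | src/benchmarktool/result/soffice.py | cellIndex
-- ===== SOURCE A (Python) =====
-- def cellIndex(row, col, absCol = False, absRow = False):
--     radix = ord("Z") - ord("A") + 1
--     ret   = ""
--     while col >= 0:
--         rem = col % radix
--         ret = chr(rem + ord("A")) + ret
--         col = col // radix - 1
--     if absCol: preCol = "$"
--     else: preCol = ""
--     if absRow: preRow = "$"
--     else: preRow = ""
--     return preCol + ret + preRow + str(row + 1)
-- ===== SOURCE B (Python) =====
-- def cellIndex(row, col, absCol = False, absRow = False):
--     # Column name by block decomposition: columns with <= k letters number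
--     # 26 + 26^2 + ... + 26^k, so first locate the letter count L and the index
--     # 'first' of the first L-letter column, then render the offset m within
--     # that block as a plain fixed-width base-26 numeral (L digits, leading
--     # 'A's allowed) by extracting each digit with powers of 26.
--     name = ""
--     if col >= 0:
--         L, first = 1, 0
--         while col - first >= 26 ** L:
--             first += 26 ** L
--             L += 1
--         m = col - first
--         name = "".join(chr(ord("A") + m // 26 ** p % 26) for p in reversed(range(L)))
--     return ("$" if absCol else "") + name + ("$" if absRow else "") + str(row + 1)
-- ===== Notes on version B (the rewrite author's own statement) =====
-- stated objective: alternative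
-- what changed: B computes the column name by block decomposition: it first finds the letter count L and the start of the L-letter block by summing powers of 26, then extracts each of the L digits of the in-block offset as a fixed-width plain base-26 numeral via powers of 26, instead of A's digit-by-digit prepend loop with the bijective quotient-minus-one recurrence.
import Mathlib
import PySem

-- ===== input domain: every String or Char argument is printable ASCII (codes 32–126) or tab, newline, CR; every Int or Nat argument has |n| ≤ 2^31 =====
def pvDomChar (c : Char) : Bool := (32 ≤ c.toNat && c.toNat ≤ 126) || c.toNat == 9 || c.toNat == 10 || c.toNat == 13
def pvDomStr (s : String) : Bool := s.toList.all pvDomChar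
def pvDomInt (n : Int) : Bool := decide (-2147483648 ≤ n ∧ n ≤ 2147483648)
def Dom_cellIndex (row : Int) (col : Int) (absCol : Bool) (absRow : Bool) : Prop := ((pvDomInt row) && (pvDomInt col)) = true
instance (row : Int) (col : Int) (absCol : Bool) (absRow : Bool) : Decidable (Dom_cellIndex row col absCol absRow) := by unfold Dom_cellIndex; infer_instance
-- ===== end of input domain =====

-- B replaces A's bijective digit-by-digit prepend loop by a block decomposition: find the
-- letter count L by summing powers of 26, then read the in-block offset as a fixed-width
-- plain base-26 numeral; objective: alternative algorithm, same return value.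

-- ===== PORT A =====
-- A's while-loop: prepend chr(col % 26 + 'A'), col := col // 26 - 1, while col ≥ 0
def cellIndexLoop (col : Int) (ret : String) : String :=
  if h : col ≥ 0 then
    cellIndexLoop (PySem.Int.floordiv col 26 - 1)
      (String.ofList (Char.ofNat (PySem.Int.mod col 26 + 65).toNat :: ret.toList))
  else ret
termination_by (col + 1).toNat
decreasing_by
  have h2 : PySem.Int.floordiv col 26 = col / 26 := PySem.Int.floordiv_eq_ediv_of_pos (by omega)
  have h3 : col / 26 ≤ col := Int.ediv_le_self 26 h
  have h4 : 0 ≤ col / 26 := Int.ediv_nonneg h (by omega)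
  omega

def cellIndex (row : Int) (col : Int) (absCol : Bool) (absRow : Bool) : String :=
  let ret := cellIndexLoop col ""
  let preCol := if absCol then "$" else ""
  let preRow := if absRow then "$" else ""
  preCol ++ ret ++ preRow ++ PySem.Int.toStr (row + 1)

-- ===== PORT B =====
-- B's first while-loop: while col - first >= 26**L: first += 26**L; L += 1
def findL (col : Int) (L : Nat) (first : Int) : Nat × Int :=
  if h : (26 : Int) ^ L ≤ col - first then findL col (L + 1) (first + 26 ^ L)
  else (L, first)
termination_by (col - first).toNat
decreasing_by
  have h1 : (1 : Int) ≤ 26 ^ L := one_le_pow₀ (by norm_num)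
  omega

-- B's join over reversed(range(L)): digit p of m is m // 26**p % 26
def bDigits (m : Int) (L : Nat) : List Char :=
  (List.range L).reverse.map
    (fun p => Char.ofNat (65 + PySem.Int.mod (PySem.Int.floordiv m ((26 : Int) ^ p)) 26).toNat)

def cellIndex_alt (row : Int) (col : Int) (absCol : Bool) (absRow : Bool) : String :=
  let name := if col ≥ 0 then
      let lf := findL col 1 0
      String.ofList (bDigits (col - lf.2) lf.1)
    else ""
  (if absCol then "$" else "") ++ name ++ (if absRow then "$" else "") ++ PySem.Int.toStr (row + 1)

-- ===== PRECONDITION & SPEC =====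
def Spec_cellIndex (row : Int) (col : Int) (absCol : Bool) (absRow : Bool) (out : String) : Prop := out = cellIndex_alt row col absCol absRow
instance (row : Int) (col : Int) (absCol : Bool) (absRow : Bool) (out : String) : Decidable (Spec_cellIndex row col absCol absRow out) := by unfold Spec_cellIndex; infer_instance

-- ===== CLAIM (what is proved, stated in full; the proofs are below) =====
def Claim_equal_cellIndex : Prop := ∀ (row : Int) (col : Int) (absCol : Bool) (absRow : Bool), Dom_cellIndex row col absCol absRow → Spec_cellIndex row col absCol absRow (cellIndex row col absCol absRow)

-- ===== LEMMAS AND PROOFS =====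

-- findL never moves 'first' past col
theorem findL_first_le (col : Int) (L : Nat) (first : Int) (h : first ≤ col) :
    (findL col L first).2 ≤ col := by
  rw [findL]
  by_cases hc : (26 : Int) ^ L ≤ col - first
  · simp only [hc, dif_pos]
    exact findL_first_le col (L + 1) (first + 26 ^ L) (by omega)
  · simp [hc, h]
termination_by (col - first).toNat
decreasing_by
  have h1 : (1 : Int) ≤ 26 ^ L := one_le_pow₀ (by norm_num)
  omega

-- shifting the input by col ↦ 26*col + 26 + r shifts findL's state by (L+1, 26*first+26)
theorem findL_shift (r col first : Int) (L : Nat) (hr0 : 0 ≤ r) (hr : r < 26) :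
    findL (26 * col + 26 + r) (L + 1) (26 * first + 26)
      = ((findL col L first).1 + 1, 26 * (findL col L first).2 + 26) := by
  conv_lhs => rw [findL]
  conv_rhs => rw [findL]
  by_cases hc : (26 : Int) ^ L ≤ col - first
  · have hc2 : (26 : Int) ^ (L + 1) ≤ 26 * col + 26 + r - (26 * first + 26) := by
      have : (26 : Int) ^ (L + 1) = 26 * 26 ^ L := by ring
      omega
    rw [dif_pos hc, dif_pos hc2]
    have harg : 26 * first + 26 + 26 ^ (L + 1) = 26 * (first + 26 ^ L) + 26 := by ring
    rw [harg]
    exact findL_shift r col (first + 26 ^ L) (L + 1) hr0 hr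
  · have h1 : (1 : Int) ≤ 26 ^ L := one_le_pow₀ (by norm_num)
    have hc2 : ¬ ((26 : Int) ^ (L + 1) ≤ 26 * col + 26 + r - (26 * first + 26)) := by
      have : (26 : Int) ^ (L + 1) = 26 * 26 ^ L := by ring
      omega
    rw [dif_neg hc, dif_neg hc2]
termination_by (col - first).toNat
decreasing_by
  have h1 : (1 : Int) ≤ 26 ^ L := one_le_pow₀ (by norm_num)
  omega

-- appending the low digit: fixed-width digits of 26*m + r at width L+1
theorem bDigits_shift (m r : Int) (L : Nat) (hr0 : 0 ≤ r) (hr : r < 26) :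
    bDigits (26 * m + r) (L + 1) = bDigits m L ++ [Char.ofNat (65 + r).toNat] := by
  unfold bDigits
  rw [List.range_succ_eq_map]
  simp only [List.reverse_cons, List.map_append, List.map_cons, List.map_nil]
  congr 1
  · -- high digits shift down by one power of 26
    rw [List.map_reverse, List.map_reverse]
    congr 1
    rw [List.map_map]
    apply List.map_congr_left
    intro p _
    simp only [Function.comp_apply, Nat.succ_eq_add_one]
    congr 2
    have e1 : PySem.Int.floordiv (26 * m + r) ((26 : Int) ^ (p + 1)) = (26 * m + r) / 26 ^ (p + 1) :=
      PySem.Int.floordiv_eq_ediv_of_pos (by positivity)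
    have e2 : PySem.Int.floordiv m ((26 : Int) ^ p) = m / 26 ^ p :=
      PySem.Int.floordiv_eq_ediv_of_pos (by positivity)
    rw [e1, e2]
    have e3 : (26 : Int) ^ (p + 1) = 26 * 26 ^ p := by ring
    rw [e3, ← Int.ediv_ediv_of_nonneg (by norm_num : (0:Int) ≤ 26)]
    have e4 : (26 * m + r) / 26 = m := by omega
    rw [e4]
  · -- low digit: m // 1 % 26 = r for m = 26*m' + r
    have hlow : PySem.Int.mod (PySem.Int.floordiv (26 * m + r) ((26 : Int) ^ 0)) 26 = r := by
      rw [pow_zero, PySem.Int.floordiv_eq_ediv_of_pos (by norm_num), Int.ediv_one,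
          PySem.Int.mod_eq_emod_of_pos (by norm_num)]
      omega
    rw [hlow]

-- A's loop equals B's block decomposition, with the accumulator appended
theorem loop_eq (col : Int) (ret : String) (h : 0 ≤ col) :
    cellIndexLoop col ret
      = String.ofList (bDigits (col - (findL col 1 0).2) (findL col 1 0).1 ++ ret.toList) := by
  rw [cellIndexLoop]
  simp only [ge_iff_le, h, dif_pos]
  have hfd : PySem.Int.floordiv col 26 = col / 26 := PySem.Int.floordiv_eq_ediv_of_pos (by omega)
  have hmd : PySem.Int.mod col 26 = col % 26 := PySem.Int.mod_eq_emod_of_pos (by omega)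
  by_cases hlt : col < 26
  · -- one-letter case: the recursive call's argument is -1, the loop stops
    have hneg : PySem.Int.floordiv col 26 - 1 = -1 := by rw [hfd]; omega
    rw [hneg, cellIndexLoop]
    simp only [ge_iff_le]
    rw [dif_neg (by omega)]
    have hf : findL col 1 0 = (1, 0) := by
      rw [findL]
      rw [dif_neg (show ¬ ((26 : Int) ^ 1 ≤ col - 0) by rw [pow_one]; omega)]
    have hd : bDigits col 1 = [Char.ofNat (65 + col).toNat] := by
      unfold bDigits
      simp only [List.range_one, List.reverse_singleton, List.map_cons, List.map_nil, pow_zero]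
      rw [PySem.Int.floordiv_eq_ediv_of_pos (by norm_num), Int.ediv_one,
          PySem.Int.mod_eq_emod_of_pos (by norm_num)]
      have : col % 26 = col := by omega
      rw [this]
    have hch : col % 26 + 65 = 65 + col := by omega
    simp [hf, hd, hch]
  · -- col ≥ 26: recurse on col' = col // 26 - 1
    have hc0 : (0 : Int) ≤ col / 26 - 1 := by omega
    have hrec : PySem.Int.floordiv col 26 - 1 = col / 26 - 1 := by rw [hfd]
    rw [hrec, loop_eq (col / 26 - 1) _ hc0]
    have hfind : findL col 1 0
        = ((findL (col / 26 - 1) 1 0).1 + 1, 26 * (findL (col / 26 - 1) 1 0).2 + 26) := by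
      conv_lhs => rw [findL]
      rw [dif_pos (show (26 : Int) ^ 1 ≤ col - 0 by rw [pow_one]; omega)]
      have e : (0 : Int) + 26 ^ 1 = 26 * 0 + 26 := by norm_num
      rw [e]
      have hdecomp : col = 26 * (col / 26 - 1) + 26 + col % 26 := by omega
      conv_lhs => rw [hdecomp]
      exact findL_shift (col % 26) (col / 26 - 1) 0 1 (by omega) (by omega)
    rw [hfind]
    have hle : (findL (col / 26 - 1) 1 0).2 ≤ col / 26 - 1 := findL_first_le _ 1 0 hc0
    have hmm : col - (26 * (findL (col / 26 - 1) 1 0).2 + 26)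
        = 26 * ((col / 26 - 1) - (findL (col / 26 - 1) 1 0).2) + col % 26 := by omega
    rw [hmm, bDigits_shift _ _ _ (by omega) (by omega)]
    have hch : PySem.Int.mod col 26 + 65 = 65 + col % 26 := by rw [hmd]; omega
    rw [hch]
    simp [List.append_assoc]
termination_by (col + 1).toNat
decreasing_by
  have h3 : col / 26 ≤ col := Int.ediv_le_self 26 h
  omega

-- ===== VERDICT (by name: the statement is the Claim_ definition above) =====
theorem cellIndex_spec : Claim_equal_cellIndex := by
  intro row col absCol absRow _
  unfold Spec_cellIndex cellIndex cellIndex_alt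
  by_cases h : 0 ≤ col
  · rw [loop_eq col "" h]
    simp [h]
  · rw [cellIndexLoop]
    simp [h]
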